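-- pv_equiv track=rewrite | github.com/rabumaabraham/DSA-UC-San-Diego | phiX174_error_prone_overlap.py | PreprocessBWT
-- ===== SOURCE A (Python) =====
-- from collections import defaultdict
--
-- def PreprocessBWT(text, order):
--     n = len(text)
--     bwt = [''] * n
--     for i in range(n):
--         bwt[i] = text[(order[i] + n - 1) % n]
--     counts = defaultdict(lambda: 0)
--     occ_count_before = defaultdict(lambda: defaultdict(lambda: 0))
--     for index, letter in enumerate(bwt):
--         counts[letter] += 1
--         for let, count in sorted(counts.items()):
--             occ_count_before[let][index + 1] = count
--     starts = defaultdict(lambda: 0)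
--     total = 0
--     for letter, count in sorted(counts.items()):
--         starts[letter] = total
--         total += count
--     return starts, occ_count_before
-- ===== SOURCE B (Python) =====
-- from collections import defaultdict
--
-- def PreprocessBWT(text, order):
--     n = len(text)
--     bwt = [text[(order[i] + n - 1) % n] for i in range(n)]
--     # distinct letters in first-occurrence order
--     seen = list(dict.fromkeys(bwt))
--     occ_count_before = defaultdict(lambda: defaultdict(lambda: 0))
--     for letter in seen:
--         inner = occ_count_before[letter]
--         c = 0
--         for p in range(1, n + 1):
--             if bwt[p - 1] == letter:
--                 c += 1
--             if c > 0:
--                 inner[p] = c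
--     starts = defaultdict(lambda: 0)
--     total = 0
--     for letter in sorted(seen):
--         starts[letter] = total
--         total += bwt.count(letter)
--     return starts, occ_count_before
-- ===== Notes on version B (the rewrite author's own statement) =====
-- stated objective: alternative
-- what changed: B computes the occurrence table column-wise (one running-count pass over positions per distinct letter, keys written from the letter's first occurrence on) instead of A's re-sorting and re-writing the whole counter dict at every position; starts comes from one cumulative pass over the sorted distinct letters.
import Mathlib
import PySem

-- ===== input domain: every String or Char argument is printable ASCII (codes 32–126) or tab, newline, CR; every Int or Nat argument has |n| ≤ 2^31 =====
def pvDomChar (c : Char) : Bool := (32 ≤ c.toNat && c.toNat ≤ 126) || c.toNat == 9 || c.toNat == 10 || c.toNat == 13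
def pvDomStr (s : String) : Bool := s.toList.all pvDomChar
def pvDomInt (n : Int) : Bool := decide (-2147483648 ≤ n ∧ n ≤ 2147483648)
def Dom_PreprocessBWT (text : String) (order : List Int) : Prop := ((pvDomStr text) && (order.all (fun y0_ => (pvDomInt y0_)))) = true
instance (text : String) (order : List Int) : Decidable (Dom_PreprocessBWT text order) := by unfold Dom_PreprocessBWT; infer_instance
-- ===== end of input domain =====

-- B computes the occurrence table column-wise (one running-count pass per distinct letter) instead
-- of A's per-position re-sort and re-write of the running counter dict.

-- ===== PORT A =====
-- Letters (1-char Python strings) are carried as Char and rendered as 1-char String in the output;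
-- sorted(counts.items()) is ported with key fst: dict keys are distinct, so Python's tuple
-- comparison is decided by the first component — exact here.
def PreprocessBWT (text : String) (order : List Int) : (List (String × Int)) × (List (String × List (Int × Int))) :=
  let n : Int := PySem.Str.len text
  let bwt : List Char := (PySem.List.pyRange 0 n 1).map (fun i =>
    (PySem.Str.pyGet? text (PySem.Int.mod ((PySem.List.pyGet? order i).getD 0 + n - 1) n)).getD ' ')
  let st := (PySem.List.enumerate bwt 0).foldl
      (fun (st : PySem.Dict Char Int × PySem.Dict Char (PySem.Dict Int Int)) p =>
        let counts := st.1.modify p.2 0 (· + 1)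
        let occ := (PySem.List.sorted counts.items (fun q => q.1)).foldl
            (fun occ q => occ.modify q.1 PySem.Dict.empty (fun inner => inner.insert (p.1 + 1) q.2)) st.2
        (counts, occ))
      (PySem.Dict.empty, PySem.Dict.empty)
  let fin := (PySem.List.sorted st.1.items (fun q => q.1)).foldl
      (fun (acc : PySem.Dict Char Int × Int) q => (acc.1.insert q.1 acc.2, acc.2 + q.2))
      (PySem.Dict.empty, 0)
  (fin.1.items.map (fun q => (String.ofList [q.1], q.2)),
   st.2.items.map (fun q => (String.ofList [q.1], q.2.items)))

-- ===== PORT B =====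
def PreprocessBWT_alt (text : String) (order : List Int) : (List (String × Int)) × (List (String × List (Int × Int))) :=
  let n : Int := PySem.Str.len text
  let bwt : List Char := (PySem.List.pyRange 0 n 1).map (fun i =>
    (PySem.Str.pyGet? text (PySem.Int.mod ((PySem.List.pyGet? order i).getD 0 + n - 1) n)).getD ' ')
  let seen : List Char := PySem.List.dedup bwt
  let occ : List (String × List (Int × Int)) := seen.map (fun letter =>
    (String.ofList [letter],
      ((PySem.List.pyRange 1 (n + 1) 1).foldl
        (fun (st : Int × List (Int × Int)) p =>
          let c := if PySem.List.pyGetD bwt (p - 1) ' ' == letter then st.1 + 1 else st.1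
          (c, if 0 < c then st.2 ++ [(p, c)] else st.2))
        (0, [])).2))
  let starts := (PySem.List.sorted seen (fun x => x)).foldl
      (fun (acc : Int × List (String × Int)) letter =>
        (acc.1 + (bwt.count letter : Int), acc.2 ++ [(String.ofList [letter], acc.1)]))
      (0, [])
  (starts.2, occ)

-- ===== PRECONDITION & SPEC =====
-- Pre_ excludes exactly the inputs where Python A raises IndexError: order must have at least
-- len(text) entries (order[i] is read for every i < len(text)).
def Pre_PreprocessBWT (text : String) (order : List Int) : Prop := text.toList.length ≤ order.length
instance (text : String) (order : List Int) : Decidable (Pre_PreprocessBWT text order) := by unfold Pre_PreprocessBWT; infer_instance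
def pvWitness_PreprocessBWT : String × List Int := ("ab$", [2, 0, 1])
def Spec_PreprocessBWT (text : String) (order : List Int) (out : (List (String × Int)) × (List (String × List (Int × Int)))) : Prop := out = PreprocessBWT_alt text order
instance (text : String) (order : List Int) (out : (List (String × Int)) × (List (String × List (Int × Int)))) : Decidable (Spec_PreprocessBWT text order out) := by unfold Spec_PreprocessBWT; infer_instance

-- ===== CLAIM (what is proved, stated in full; the proofs are below) =====
def Claim_equal_PreprocessBWT : Prop := ∀ (text : String) (order : List Int), Dom_PreprocessBWT text order → Pre_PreprocessBWT text order → Spec_PreprocessBWT text order (PreprocessBWT text order)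

-- ===== LEMMAS AND PROOFS =====

-- inner table of letter L: (p, #occurrences of L in bwt[0..p-1]) for every position p with a positive count
def pvInner (L : Char) (bwt : List Char) : List (Int × Int) :=
  (List.range bwt.length).filterMap (fun j =>
    if 0 < (bwt.take (j+1)).count L then some (((j : Int) + 1), (((bwt.take (j+1)).count L : Nat) : Int)) else none)

-- the occ dict A maintains, in closed form
def pvOccSpec (bwt : List Char) : PySem.Dict Char (PySem.Dict Int Int) :=
  PySem.Dict.mk ((PySem.Set.ofList bwt).map (fun L => (L, PySem.Dict.mk (pvInner L bwt))))

-- the starts entries: letters of S paired with running prefix sums of cnt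
def pvPrefix (S : List Char) (cnt : Char → Int) (t : Int) : List (Char × Int) :=
  match S with
  | [] => []
  | L :: rest => (L, t) :: pvPrefix rest cnt (t + cnt L)

theorem pv_foldMod {κ ν : Type} [BEq κ] [LawfulBEq κ] (S : List κ) (f : κ → ν → ν) (e : ν) :
    ∀ (d : PySem.Dict κ ν), S.Nodup → d.keys.Nodup →
    (S.foldl (fun occ L => occ.modify L e (f L)) d).items
      = d.items.map (fun p => if p.1 ∈ S then (p.1, f p.1 p.2) else p)
        ++ (S.filter (fun L => !d.contains L)).map (fun L => (L, f L e)) := by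
  induction S with
  | nil => intro d _ _; simp
  | cons L rest ih =>
    intro d hS hd
    have hLrest : L ∉ rest := (List.nodup_cons.mp hS).1
    have hrestnd : rest.Nodup := (List.nodup_cons.mp hS).2
    have hfst : ∀ p ∈ d.items, p.1 ∈ d.keys := by
      intro p hp
      simp only [PySem.Dict.keys]
      exact List.mem_map_of_mem hp
    simp only [List.foldl_cons]
    by_cases hc : d.contains L = true
    · have hmod : d.modify L e (f L) = d.insert L (f L (d.getD L e)) := rfl
      have hkeys : (d.insert L (f L (d.getD L e))).keys.Nodup :=
        PySem.Dict.nodup_keys_insert d L _ hd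
      have hcont : ∀ x ∈ rest, (d.insert L (f L (d.getD L e))).contains x = d.contains x := by
        intro x hx
        rw [PySem.Dict.contains_insert]
        have hne : (x == L) = false := by
          simp only [beq_eq_false_iff_ne]; rintro rfl; exact hLrest hx
        simp [hne]
      rw [hmod, ih _ hrestnd hkeys, PySem.Dict.items_insert_of_contains d _ hc]
      congr 1
      · rw [List.map_map]
        apply List.map_congr_left
        intro p hp
        by_cases hpL : p.1 = L
        · have hgd : d.getD L e = p.2 := by
            apply PySem.Dict.getD_of_mem_items (d := d) (k := L) (v := p.2) _ hd
            rw [← hpL]; simpa using hp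
          simp only [Function.comp_apply, hpL, BEq.rfl, if_true, hgd]
          have h1 : (L ∈ rest) = False := by simp [hLrest]
          have h2 : (L ∈ L :: rest) = True := by simp
          simp [h1, h2]
        · have hne : (p.1 == L) = false := by simp [hpL]
          simp only [Function.comp_apply, hne, Bool.false_eq_true, if_false]
          simp [List.mem_cons, hpL]
      · rw [List.filter_cons]
        have : (!d.contains L) = false := by simp [hc]
        simp only [this, Bool.false_eq_true, if_false]
        congr 1
        apply List.filter_congr
        intro x hx
        rw [hcont x hx]
    · have hcf : d.contains L = false := by simpa using hc
      have hgd : d.getD L e = e := PySem.Dict.getD_of_not_contains d e hcf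
      have hmod : d.modify L e (f L) = d.insert L (f L e) := by
        show d.insert L (f L (d.getD L e)) = d.insert L (f L e)
        rw [hgd]
      have hkeys : (d.insert L (f L e)).keys.Nodup := PySem.Dict.nodup_keys_insert d L _ hd
      have hcont : ∀ x ∈ rest, (d.insert L (f L e)).contains x = d.contains x := by
        intro x hx
        rw [PySem.Dict.contains_insert]
        have hne : (x == L) = false := by
          simp only [beq_eq_false_iff_ne]; rintro rfl; exact hLrest hx
        simp [hne]
      rw [hmod, ih _ hrestnd hkeys, PySem.Dict.items_insert_of_not_contains d _ hcf]
      rw [List.map_append]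
      have hlast : [(L, f L e)].map (fun p => if p.1 ∈ rest then (p.1, f p.1 p.2) else p)
          = [(L, f L e)] := by simp [hLrest]
      rw [hlast]
      have hmapeq : d.items.map (fun p => if p.1 ∈ rest then (p.1, f p.1 p.2) else p)
          = d.items.map (fun p => if p.1 ∈ L :: rest then (p.1, f p.1 p.2) else p) := by
        apply List.map_congr_left
        intro p hp
        have hpL : p.1 ≠ L := by
          rintro rfl
          rw [PySem.Dict.contains_iff_mem_keys] at hc
          exact hc (hfst p hp)
        simp [List.mem_cons, hpL]
      rw [hmapeq]
      have hfilter : (L :: rest).filter (fun x => !d.contains x)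
          = L :: rest.filter (fun x => !d.contains x) := by
        rw [List.filter_cons]
        simp [hcf]
      rw [hfilter]
      have hfilter2 : rest.filter (fun x => !(d.insert L (f L e)).contains x)
          = rest.filter (fun x => !d.contains x) := by
        apply List.filter_congr
        intro x hx
        rw [hcont x hx]
      rw [hfilter2]
      simp [List.append_assoc]

theorem pv_sortedCounter (xs : List Char) :
    PySem.List.sorted (PySem.Dict.counter xs).items (fun q => q.1)
      = (PySem.List.sorted (PySem.Set.ofList xs) (fun x => x)).map (fun L => (L, (xs.count L : Int))) := by
  rw [PySem.Dict.items_counter]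
  apply PySem.List.sorted_eq_of_perm_of_pairwise_lt
  · exact (PySem.List.sorted_perm _ _ _).map _
  · exact List.pairwise_map.mpr (PySem.List.sorted_ofList_pairwise_lt xs)

theorem pv_inner_notmem (L : Char) (l : List Char) (h : L ∉ l) : pvInner L l = [] := by
  rw [pvInner, List.filterMap_eq_nil_iff]
  intro j hj
  have : (l.take (j+1)).count L = 0 :=
    List.count_eq_zero.mpr (fun hm => h (List.mem_of_mem_take hm))
  simp [this]

theorem pv_inner_append (l : List Char) (y L : Char) (hL : L ∈ l ++ [y]) :
    pvInner L (l ++ [y]) = pvInner L l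
      ++ [(((l.length : Int) + 1, (((l ++ [y]).count L : Nat) : Int)))] := by
  have hlen : (l ++ [y]).length = l.length + 1 := by simp
  rw [pvInner, pvInner, hlen, List.range_succ, List.filterMap_append]
  congr 1
  · apply List.filterMap_congr
    intro j hj
    have hjl : j + 1 ≤ l.length := List.mem_range.mp hj
    rw [List.take_append_of_le_length hjl]
  · have htake : (l ++ [y]).take (l.length + 1) = l ++ [y] :=
      List.take_of_length_le (by simp)
    have hpos : 0 < (l ++ [y]).count L := List.count_pos_iff.mpr hL
    rw [List.filterMap_cons, List.filterMap_nil]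
    simp only [htake]
    rw [if_pos hpos]

theorem pv_inner_fresh (L : Char) (bwt : List Char) :
    (PySem.Dict.mk (pvInner L bwt)).contains ((bwt.length : Int) + 1) = false := by
  rw [PySem.Dict.contains_mk, List.any_eq_false]
  intro p hp
  rw [pvInner] at hp
  obtain ⟨j, hj, hpj⟩ := List.mem_filterMap.mp hp
  have hjl : j < bwt.length := List.mem_range.mp hj
  split at hpj
  · cases hpj
    simp only [beq_iff_eq]
    intro hcontra
    have : (j : Int) + 1 = (bwt.length : Int) + 1 := hcontra
    omega
  · cases hpj

theorem pv_occSpec_keys (l : List Char) : (pvOccSpec l).keys = PySem.Set.ofList l := by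
  rw [pvOccSpec]
  rw [PySem.Dict.keys_mk, List.map_map]
  show List.map (fun L => L) _ = _
  exact List.map_id _

theorem pv_occSpec_contains (l : List Char) (x : Char) :
    (pvOccSpec l).contains x = true ↔ x ∈ l := by
  rw [PySem.Dict.contains_iff_mem_keys, pv_occSpec_keys, PySem.Set.mem_ofList]

theorem pv_filter_singleton (xs : List Char) (p : Char → Bool) (y : Char) :
    xs.Nodup → y ∈ xs → p y = true → (∀ x ∈ xs, p x = true → x = y) → xs.filter p = [y] := by
  induction xs with
  | nil => intro _ hy; cases hy
  | cons a as ih =>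
    intro hnd hy hpy hall
    rcases List.mem_cons.mp hy with rfl | hyas
    · rw [List.filter_cons, if_pos hpy]
      have : as.filter p = [] := by
        rw [List.filter_eq_nil_iff]
        intro x hx hpx
        have := hall x (List.mem_cons_of_mem _ hx) hpx
        subst this
        exact absurd hx (List.nodup_cons.mp hnd).1
      rw [this]
    · have hay : a ≠ y := by rintro rfl; exact (List.nodup_cons.mp hnd).1 hyas
      rw [List.filter_cons]
      have hpa : p a = false := by
        by_contra h
        exact hay (hall a List.mem_cons_self (by simpa using h))
      rw [if_neg (by simp [hpa])]
      exact ih (List.nodup_cons.mp hnd).2 hyas hpy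
        (fun x hx hpx => hall x (List.mem_cons_of_mem _ hx) hpx)

theorem pv_stateA (bwt : List Char) :
    (PySem.List.enumerate bwt 0).foldl
      (fun (st : PySem.Dict Char Int × PySem.Dict Char (PySem.Dict Int Int)) p =>
        let counts := st.1.modify p.2 0 (· + 1)
        let occ := (PySem.List.sorted counts.items (fun q => q.1)).foldl
            (fun occ q => occ.modify q.1 PySem.Dict.empty (fun inner => inner.insert (p.1 + 1) q.2)) st.2
        (counts, occ))
      (PySem.Dict.empty, PySem.Dict.empty)
    = (PySem.Dict.counter bwt, pvOccSpec bwt) := by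
  induction bwt using List.reverseRecOn with
  | nil => rfl
  | append_singleton l y ih =>
    rw [PySem.List.enumerate_append, List.foldl_append, ih]
    simp only [PySem.List.enumerate_cons, PySem.List.enumerate_nil, List.foldl_cons,
      List.foldl_nil, zero_add]
    have hcnt : (PySem.Dict.counter l).modify y 0 (· + 1) = PySem.Dict.counter (l ++ [y]) :=
      (PySem.Dict.counter_append_singleton l y).symm
    refine Prod.ext ?_ ?_
    · exact hcnt
    · simp only [hcnt]
      rw [pv_sortedCounter (l ++ [y]), List.foldl_map]
      have hSnd : (PySem.List.sorted (PySem.Set.ofList (l ++ [y])) (fun x => x)).Nodup :=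
        (PySem.List.sorted_perm _ _ _).nodup_iff.mpr (PySem.Set.nodup_ofList _)
      have hknd : (pvOccSpec l).keys.Nodup := by
        rw [pv_occSpec_keys]; exact PySem.Set.nodup_ofList l
      apply PySem.Dict.ext
      rw [pv_foldMod (PySem.List.sorted (PySem.Set.ofList (l ++ [y])) (fun x => x))
        (fun L inn => inn.insert ((l.length : Int) + 1) (((l ++ [y]).count L : Nat) : Int))
        PySem.Dict.empty (pvOccSpec l) hSnd hknd]
      have hmap : (pvOccSpec l).items.map
            (fun p => if p.1 ∈ PySem.List.sorted (PySem.Set.ofList (l ++ [y])) (fun x => x)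
              then (p.1, p.2.insert ((l.length : Int) + 1) (((l ++ [y]).count p.1 : Nat) : Int)) else p)
          = (PySem.Set.ofList l).map (fun L => (L, PySem.Dict.mk (pvInner L (l ++ [y])))) := by
        show ((PySem.Set.ofList l).map (fun L => (L, PySem.Dict.mk (pvInner L l)))).map _ = _
        rw [List.map_map]
        apply List.map_congr_left
        intro L hL
        have hLmem : L ∈ l := (PySem.Set.mem_ofList l L).mp hL
        have hLS : L ∈ PySem.List.sorted (PySem.Set.ofList (l ++ [y])) (fun x => x) := by
          rw [PySem.List.mem_sorted, PySem.Set.mem_ofList]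
          exact List.mem_append_left _ hLmem
        simp only [Function.comp_apply, hLS, if_pos]
        refine congrArg (fun d => (L, d)) ?_
        apply PySem.Dict.ext
        rw [PySem.Dict.items_insert_of_not_contains _ _ (pv_inner_fresh L l)]
        show pvInner L l ++ [(((l.length : Int) + 1, (((l ++ [y]).count L : Nat) : Int)))]
          = pvInner L (l ++ [y])
        exact (pv_inner_append l y L (List.mem_append_left _ hLmem)).symm
      rw [hmap]
      by_cases hy : y ∈ l
      · have hfil : (PySem.List.sorted (PySem.Set.ofList (l ++ [y])) (fun x => x)).filter
              (fun L => !(pvOccSpec l).contains L) = [] := by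
          rw [List.filter_eq_nil_iff]
          intro x hxS hpx
          have hx : x ∈ l ++ [y] := by
            rw [PySem.List.mem_sorted, PySem.Set.mem_ofList] at hxS; exact hxS
          have hxl : x ∈ l := by
            rcases List.mem_append.mp hx with h | h
            · exact h
            · simp only [List.mem_singleton] at h; subst h; exact hy
          exact absurd ((pv_occSpec_contains l x).mpr hxl) (by simpa using hpx)
        have hofl : PySem.Set.ofList (l ++ [y]) = PySem.Set.ofList l := by
          rw [PySem.Set.ofList_append_singleton, PySem.Set.add, if_pos]
          rw [PySem.Set.contains, List.contains_iff_mem, PySem.Set.mem_ofList]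
          exact hy
        rw [hfil, List.map_nil, List.append_nil]
        show _ = (PySem.Set.ofList (l ++ [y])).map _
        rw [hofl]
      · have hcny : (pvOccSpec l).contains y = false := by
          by_contra h
          exact hy ((pv_occSpec_contains l y).mp (by simpa using h))
        have hfil : (PySem.List.sorted (PySem.Set.ofList (l ++ [y])) (fun x => x)).filter
              (fun L => !(pvOccSpec l).contains L) = [y] := by
          apply pv_filter_singleton _ _ _ hSnd
          · rw [PySem.List.mem_sorted, PySem.Set.mem_ofList]
            exact List.mem_append_right _ (List.mem_singleton.mpr rfl)
          · simp [hcny]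
          · intro x hxS hpx
            have hx : x ∈ l ++ [y] := by
              rw [PySem.List.mem_sorted, PySem.Set.mem_ofList] at hxS; exact hxS
            rcases List.mem_append.mp hx with h | h
            · exfalso
              exact absurd ((pv_occSpec_contains l x).mpr h) (by simpa using hpx)
            · simpa using h
        have hofl : PySem.Set.ofList (l ++ [y]) = PySem.Set.ofList l ++ [y] := by
          rw [PySem.Set.ofList_append_singleton, PySem.Set.add, if_neg]
          rw [PySem.Set.contains, List.contains_iff_mem, PySem.Set.mem_ofList]
          exact hy
        rw [hfil]
        show _ = (PySem.Set.ofList (l ++ [y])).map _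
        rw [hofl, List.map_append]
        congr 1
        simp only [List.map_cons, List.map_nil]
        refine congrArg (fun d => [(y, d)]) ?_
        apply PySem.Dict.ext
        rw [PySem.Dict.items_insert_of_not_contains _ _ (PySem.Dict.contains_empty _)]
        show ([] : List (Int × Int)) ++ [(((l.length : Int) + 1, (((l ++ [y]).count y : Nat) : Int)))]
          = pvInner y (l ++ [y])
        rw [List.nil_append,
          pv_inner_append l y y (List.mem_append_right _ (List.mem_singleton.mpr rfl)),
          pv_inner_notmem y l hy, List.nil_append]

theorem pv_innerB_aux (bwt : List Char) (L : Char) :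
    ∀ m : Nat, m ≤ bwt.length →
    ((PySem.List.pyRange 1 ((m : Int) + 1) 1).foldl
        (fun (st : Int × List (Int × Int)) p =>
          let c := if PySem.List.pyGetD bwt (p - 1) ' ' == L then st.1 + 1 else st.1
          (c, if 0 < c then st.2 ++ [(p, c)] else st.2))
        (0, []))
      = ((((bwt.take m).count L : Nat) : Int),
         (List.range m).filterMap (fun j =>
           if 0 < (bwt.take (j+1)).count L then some (((j : Int) + 1), (((bwt.take (j+1)).count L : Nat) : Int)) else none)) := by
  intro m
  induction m with
  | zero => intro _; rw [PySem.List.pyRange_one_eq_nil (by norm_num)]; simp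
  | succ m ih =>
    intro hm
    have hml : m < bwt.length := hm
    have hcast : (((m + 1 : Nat) : Int) + 1) = ((m : Int) + 1) + 1 := by push_cast; ring
    rw [hcast, PySem.List.pyRange_one_succ_right (by omega), List.foldl_append,
        ih (Nat.le_of_lt hml)]
    have hget : PySem.List.pyGetD bwt ((m : Int) + 1 - 1) ' ' = bwt[m] := by
      have : ((m : Int) + 1 - 1) = (m : Int) := by ring
      rw [this, PySem.List.pyGetD_eq_getElem bwt ' ' (by positivity) (by exact_mod_cast hml)]
      simp
    have htake : bwt.take (m+1) = bwt.take m ++ [bwt[m]] := by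
      rw [List.take_add_one, List.getElem?_eq_getElem hml]; rfl
    have hcnt : ((bwt.take (m+1)).count L : Int)
        = (if (bwt[m] == L) = true then ((bwt.take m).count L : Int) + 1 else ((bwt.take m).count L : Int)) := by
      rw [htake, List.count_append]
      by_cases hx : (bwt[m] == L) = true <;> simp [hx, List.count_singleton]
    simp only [List.foldl_cons, List.foldl_nil, List.range_succ, List.filterMap_append, hget]
    refine Prod.ext ?_ ?_
    · simp only []
      rw [← hcnt]
    · simp only []
      rw [← hcnt]
      by_cases hp : L ∈ bwt.take (m+1)
      · have hpi : (0:Int) < ((bwt.take (m+1)).count L : Int) := by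
          exact_mod_cast List.count_pos_iff.mpr hp
        simp [hp]
      · have hpi : ¬ (0:Int) < ((bwt.take (m+1)).count L : Int) := by
          intro hcp
          exact hp (List.count_pos_iff.mp (by exact_mod_cast hcp))
        simp [hp]

theorem pv_innerB (bwt : List Char) (L : Char) :
    ((PySem.List.pyRange 1 ((bwt.length : Int) + 1) 1).foldl
        (fun (st : Int × List (Int × Int)) p =>
          let c := if PySem.List.pyGetD bwt (p - 1) ' ' == L then st.1 + 1 else st.1
          (c, if 0 < c then st.2 ++ [(p, c)] else st.2))
        (0, [])).2 = pvInner L bwt := by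
  have := pv_innerB_aux bwt L bwt.length (le_refl _)
  rw [pvInner]
  rw [this]

theorem pv_startsA (S : List Char) (cnt : Char → Int) :
    ∀ (d : PySem.Dict Char Int) (t : Int), S.Nodup → (∀ L ∈ S, d.contains L = false) →
    ((S.map (fun L => (L, cnt L))).foldl
        (fun (acc : PySem.Dict Char Int × Int) q => (acc.1.insert q.1 acc.2, acc.2 + q.2)) (d, t)).1.items
      = d.items ++ pvPrefix S cnt t := by
  induction S with
  | nil => intro d t _ _; simp [pvPrefix]
  | cons L rest ih =>
    intro d t hnd hfresh
    have hcL : d.contains L = false := hfresh L (List.mem_cons_self)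
    have hfresh' : ∀ L' ∈ rest, (d.insert L t).contains L' = false := by
      intro L' hL'
      rw [PySem.Dict.contains_insert]
      have : (L' == L) = false := by
        simp only [beq_eq_false_iff_ne]
        rintro rfl; exact (List.nodup_cons.mp hnd).1 hL'
      simp [this, hfresh L' (List.mem_cons_of_mem _ hL')]
    simp only [List.map_cons, List.foldl_cons]
    rw [ih (d.insert L t) (t + cnt L) (List.nodup_cons.mp hnd).2 hfresh',
        PySem.Dict.items_insert_of_not_contains _ _ hcL]
    simp [pvPrefix]

theorem pv_startsB (S : List Char) (cnt : Char → Int) :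
    ∀ (t : Int) (acc : List (String × Int)),
    (S.foldl (fun (a : Int × List (String × Int)) L => (a.1 + cnt L, a.2 ++ [(String.ofList [L], a.1)])) (t, acc)).2
      = acc ++ (pvPrefix S cnt t).map (fun q => (String.ofList [q.1], q.2)) := by
  induction S with
  | nil => intro t acc; simp [pvPrefix]
  | cons L rest ih => intro t acc; simp [pvPrefix, ih (t + cnt L) (acc ++ [(String.ofList [L], t)])]



theorem pv_main (n : Int) (bwt : List Char) (hn : n = (bwt.length : Int)) :
    (let st := (PySem.List.enumerate bwt 0).foldl
      (fun (st : PySem.Dict Char Int × PySem.Dict Char (PySem.Dict Int Int)) p =>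
        let counts := st.1.modify p.2 0 (· + 1)
        let occ := (PySem.List.sorted counts.items (fun q => q.1)).foldl
            (fun occ q => occ.modify q.1 PySem.Dict.empty (fun inner => inner.insert (p.1 + 1) q.2)) st.2
        (counts, occ))
      (PySem.Dict.empty, PySem.Dict.empty)
     let fin := (PySem.List.sorted st.1.items (fun q => q.1)).foldl
      (fun (acc : PySem.Dict Char Int × Int) q => (acc.1.insert q.1 acc.2, acc.2 + q.2))
      (PySem.Dict.empty, 0)
     ((fin.1.items.map (fun q => (String.ofList [q.1], q.2)),
       st.2.items.map (fun q => (String.ofList [q.1], q.2.items))) :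
        (List (String × Int)) × (List (String × List (Int × Int)))))
    = (let seen : List Char := PySem.List.dedup bwt
       let occ : List (String × List (Int × Int)) := seen.map (fun letter =>
         (String.ofList [letter],
           ((PySem.List.pyRange 1 (n + 1) 1).foldl
             (fun (st : Int × List (Int × Int)) p =>
               let c := if PySem.List.pyGetD bwt (p - 1) ' ' == letter then st.1 + 1 else st.1
               (c, if 0 < c then st.2 ++ [(p, c)] else st.2))
             (0, [])).2))
       let starts := (PySem.List.sorted seen (fun x => x)).foldl
         (fun (acc : Int × List (String × Int)) letter =>
           (acc.1 + (bwt.count letter : Int), acc.2 ++ [(String.ofList [letter], acc.1)]))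
         (0, [])
       (starts.2, occ)) := by
  subst hn
  dsimp only
  rw [pv_stateA, pv_sortedCounter bwt]
  have hSnd : (PySem.List.sorted (PySem.Set.ofList bwt) (fun x => x)).Nodup :=
    (PySem.List.sorted_perm _ _ _).nodup_iff.mpr (PySem.Set.nodup_ofList _)
  refine Prod.ext ?_ ?_
  · rw [pv_startsA (PySem.List.sorted (PySem.Set.ofList bwt) (fun x => x))
      (fun L => (bwt.count L : Int)) PySem.Dict.empty 0 hSnd
      (fun L _ => PySem.Dict.contains_empty L)]
    rw [pv_startsB (PySem.List.sorted (PySem.List.dedup bwt) (fun x => x))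
      (fun L => (bwt.count L : Int)) 0 []]
    show ((PySem.Dict.empty.items ++ _).map _ : List (String × Int)) = _
    rw [show (PySem.Dict.empty : PySem.Dict Char Int).items = [] from rfl]
    rw [show PySem.List.dedup bwt = PySem.Set.ofList bwt from rfl]
    simp
  · show ((PySem.Set.ofList bwt).map (fun L => (L, PySem.Dict.mk (pvInner L bwt)))).map
        (fun q => (String.ofList [q.1], q.2.items)) = _
    rw [List.map_map, show PySem.List.dedup bwt = PySem.Set.ofList bwt from rfl]
    apply List.map_congr_left
    intro L _
    simp only [Function.comp_apply]
    rw [pv_innerB bwt L]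

-- ===== VERDICT (by name: the statement is the Claim_ definition above) =====
theorem PreprocessBWT_spec : Claim_equal_PreprocessBWT := by
  intro text order _ _
  unfold Spec_PreprocessBWT PreprocessBWT PreprocessBWT_alt
  apply pv_main
  simp [PySem.List.length_pyRange_one]
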